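-- pv_equiv track=rewrite | github.com/Juvenes/yes-partener | core/timeseries.py | _select_profile_column
-- ===== SOURCE A (Python) =====
-- from typing import Dict, Iterable, List, Optional, Tuple, Union
--
-- PRODUCTION_KEYWORDS = ("prod", "export", "injection", "generation")
--
-- CONSUMPTION_KEYWORDS = ("conso", "load", "a+", "import", "consumption")
--
-- def _select_profile_column(profile_type: str, columns: List[str]) -> str:
--     lowered = {col: col.lower() for col in columns}
--
--     def _matches(col: str, keywords: Iterable[str]) -> bool:
--         return any(keyword in lowered[col] for keyword in keywords)
--
--     thousand_cols = [
--         col for col in columns if "1000" in lowered[col] or "mwh" in lowered[col]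
--     ]
--     base_cols = [col for col in columns if col not in thousand_cols]
--
--     if profile_type == "consumption":
--         preference_groups = [
--             [col for col in thousand_cols if _matches(col, CONSUMPTION_KEYWORDS)],
--             thousand_cols,
--             [col for col in base_cols if _matches(col, CONSUMPTION_KEYWORDS)],
--             base_cols,
--         ]
--     elif profile_type == "production":
--         preference_groups = [
--             [col for col in base_cols if _matches(col, PRODUCTION_KEYWORDS)],
--             [col for col in columns if _matches(col, PRODUCTION_KEYWORDS)],
--             base_cols,
--         ]
--     else:
--         preference_groups = [
--             [
--                 col
--                 for col in base_cols
--                 if _matches(col, PRODUCTION_KEYWORDS + CONSUMPTION_KEYWORDS)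
--             ],
--             base_cols,
--             thousand_cols,
--         ]
--
--     for group in preference_groups:
--         if group:
--             return group[0]
--
--     return columns[0]
-- ===== SOURCE B (Python) =====
-- from typing import List
--
-- PRODUCTION_KEYWORDS = ("prod", "export", "injection", "generation")
--
-- CONSUMPTION_KEYWORDS = ("conso", "load", "a+", "import", "consumption")
--
--
-- def _select_profile_column(profile_type: str, columns: List[str]) -> str:
--     def priority(col: str) -> int:
--         lc = col.lower()
--         thousand = "1000" in lc or "mwh" in lc
--         if profile_type == "consumption":
--             match = any(k in lc for k in CONSUMPTION_KEYWORDS)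
--             if thousand:
--                 return 0 if match else 1
--             return 2 if match else 3
--         if profile_type == "production":
--             match = any(k in lc for k in PRODUCTION_KEYWORDS)
--             if match:
--                 return 1 if thousand else 0
--             return 3 if thousand else 2
--         match = any(k in lc for k in PRODUCTION_KEYWORDS + CONSUMPTION_KEYWORDS)
--         if thousand:
--             return 2
--         return 0 if match else 1
--
--     return min(columns, key=priority)
-- ===== Notes on version B (the rewrite author's own statement) =====
-- stated objective: simpler
-- what changed: Replaces the dict of lowered names, the thousand/base list partition and the ordered preference-group scan by a single integer tier function per column and one min(columns, key=priority) pass that returns the first column of lowest tier; Pre_ excludes only the empty column list, on which both A and B raise.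
import Mathlib
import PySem

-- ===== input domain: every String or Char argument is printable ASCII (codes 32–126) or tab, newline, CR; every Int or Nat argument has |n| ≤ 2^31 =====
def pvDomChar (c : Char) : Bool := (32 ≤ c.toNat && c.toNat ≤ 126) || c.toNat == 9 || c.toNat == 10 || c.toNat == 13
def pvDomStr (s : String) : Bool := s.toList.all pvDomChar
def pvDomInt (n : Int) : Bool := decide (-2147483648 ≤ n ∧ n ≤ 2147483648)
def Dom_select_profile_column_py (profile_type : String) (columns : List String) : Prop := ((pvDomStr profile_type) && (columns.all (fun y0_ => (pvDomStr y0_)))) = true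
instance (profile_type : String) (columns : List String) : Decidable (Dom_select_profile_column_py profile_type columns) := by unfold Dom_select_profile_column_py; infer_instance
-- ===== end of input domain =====

-- B replaces A's lowered-name dict, thousand/base list partition and ordered preference-group
-- scan by one integer tier per column and a single min(columns, key=priority) pass (objective: simpler).

-- ===== PORT A =====
def PRODUCTION_KEYWORDS : List String := ["prod", "export", "injection", "generation"]

def CONSUMPTION_KEYWORDS : List String := ["conso", "load", "a+", "import", "consumption"]

-- A's final loop "for group in preference_groups: if group: return group[0]"
def pvFirstGroup : List (List String) → Option String
  | [] => none
  | [] :: rest => pvFirstGroup rest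
  | (c :: _) :: _ => some c

def select_profile_column_py (profile_type : String) (columns : List String) : String :=
  let lowered : PySem.Dict String String :=
    PySem.Dict.ofList (columns.map (fun col => (col, PySem.Str.lower col)))
  -- _matches(col, keywords): any(keyword in lowered[col] for keyword in keywords)
  let matchesF := fun (col : String) (keywords : List String) =>
    keywords.any (fun keyword => PySem.Str.isIn keyword (lowered.getD col ""))
  let thousand_cols := columns.filter (fun col =>
    PySem.Str.isIn "1000" (lowered.getD col "") || PySem.Str.isIn "mwh" (lowered.getD col ""))
  let base_cols := columns.filter (fun col => !(thousand_cols.contains col))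
  let preference_groups :=
    if profile_type == "consumption" then
      [thousand_cols.filter (fun col => matchesF col CONSUMPTION_KEYWORDS),
       thousand_cols,
       base_cols.filter (fun col => matchesF col CONSUMPTION_KEYWORDS),
       base_cols]
    else if profile_type == "production" then
      [base_cols.filter (fun col => matchesF col PRODUCTION_KEYWORDS),
       columns.filter (fun col => matchesF col PRODUCTION_KEYWORDS),
       base_cols]
    else
      [base_cols.filter (fun col => matchesF col (PRODUCTION_KEYWORDS ++ CONSUMPTION_KEYWORDS)),
       base_cols,
       thousand_cols]
  match pvFirstGroup preference_groups with
  | some c => c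
  | none => (PySem.List.pyGet? columns 0).getD ""   -- columns[0]; Pre_ guarantees columns ≠ []

-- ===== PORT B =====
def select_profile_column_py_alt (profile_type : String) (columns : List String) : String :=
  let priority := fun (col : String) =>
    let lc := PySem.Str.lower col
    let thousand := PySem.Str.isIn "1000" lc || PySem.Str.isIn "mwh" lc
    if profile_type == "consumption" then
      let m := CONSUMPTION_KEYWORDS.any (fun k => PySem.Str.isIn k lc)
      if thousand then (if m then 0 else 1) else (if m then 2 else 3)
    else if profile_type == "production" then
      let m := PRODUCTION_KEYWORDS.any (fun k => PySem.Str.isIn k lc)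
      if m then (if thousand then 1 else 0) else (if thousand then 3 else 2)
    else
      let m := (PRODUCTION_KEYWORDS ++ CONSUMPTION_KEYWORDS).any (fun k => PySem.Str.isIn k lc)
      if thousand then 2 else (if m then 0 else (1 : Nat))
  (PySem.List.min? columns priority).getD ""   -- min raises on []; Pre_ guarantees columns ≠ []

-- ===== PRECONDITION & SPEC =====
-- A raises IndexError on columns = [] (and B's min raises ValueError there); that is all Pre_ excludes.
def Pre_select_profile_column_py (profile_type : String) (columns : List String) : Prop :=
  columns ≠ []
instance (profile_type : String) (columns : List String) : Decidable (Pre_select_profile_column_py profile_type columns) := by unfold Pre_select_profile_column_py; infer_instance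

def pvWitness_select_profile_column_py : String × List String :=
  ("consumption", ["Load_1000", "prod_mwh", "value"])

def Spec_select_profile_column_py (profile_type : String) (columns : List String) (out : String) : Prop := out = select_profile_column_py_alt profile_type columns
instance (profile_type : String) (columns : List String) (out : String) : Decidable (Spec_select_profile_column_py profile_type columns out) := by unfold Spec_select_profile_column_py; infer_instance

-- ===== CLAIM (what is proved, stated in full; the proofs are below) =====
def Claim_equal_select_profile_column_py : Prop := ∀ (profile_type : String) (columns : List String), Dom_select_profile_column_py profile_type columns → Pre_select_profile_column_py profile_type columns → Spec_select_profile_column_py profile_type columns (select_profile_column_py profile_type columns)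

-- ===== LEMMAS AND PROOFS =====

-- pure per-column predicates (proof helpers)
def pvTh (c : String) : Bool :=
  PySem.Str.isIn "1000" (PySem.Str.lower c) || PySem.Str.isIn "mwh" (PySem.Str.lower c)
def pvMC (c : String) : Bool :=
  CONSUMPTION_KEYWORDS.any (fun k => PySem.Str.isIn k (PySem.Str.lower c))
def pvMP (c : String) : Bool :=
  PRODUCTION_KEYWORDS.any (fun k => PySem.Str.isIn k (PySem.Str.lower c))
def pvMPC (c : String) : Bool :=
  (PRODUCTION_KEYWORDS ++ CONSUMPTION_KEYWORDS).any (fun k => PySem.Str.isIn k (PySem.Str.lower c))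

-- B's priority as a named function
def pvTier (profile_type : String) (c : String) : Nat :=
  if profile_type == "consumption" then
    if pvTh c then (if pvMC c then 0 else 1) else (if pvMC c then 2 else 3)
  else if profile_type == "production" then
    if pvMP c then (if pvTh c then 1 else 0) else (if pvTh c then 3 else 2)
  else
    if pvTh c then 2 else (if pvMPC c then 0 else 1)

theorem pvTier_le (pt c : String) : pvTier pt c ≤ 3 := by
  unfold pvTier; split_ifs <;> omega

theorem pv_getD_foldl (f : String → String) (l : List String) :
    ∀ (d : PySem.Dict String String) (x : String),
      ((l.foldl (fun d c => d.insert c (f c)) d)).getD x "" =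
        if x ∈ l then f x else d.getD x "" := by
  induction l with
  | nil => intro d x; simp
  | cons c l ih =>
      intro d x
      simp only [List.foldl_cons, ih, List.mem_cons]
      by_cases hx : x ∈ l
      · simp [hx]
      · by_cases hxc : x = c
        · simp [hx, hxc, PySem.Dict.getD_insert]
        · simp [hx, hxc, PySem.Dict.getD_insert]

theorem pv_getD_lowered (l : List String) (x : String) (hx : x ∈ l) :
    (PySem.Dict.ofList (l.map (fun col => (col, PySem.Str.lower col)))).getD x ""
      = PySem.Str.lower x := by
  have h : (l.map (fun col => (col, PySem.Str.lower col))).foldl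
      (fun acc p => acc.insert p.1 p.2) PySem.Dict.empty
      = l.foldl (fun d c => d.insert c (PySem.Str.lower c)) PySem.Dict.empty := by
    rw [List.foldl_map]
  show (PySem.Dict.empty.update (l.map (fun col => (col, PySem.Str.lower col)))).getD x "" = _
  unfold PySem.Dict.update
  rw [h, pv_getD_foldl, if_pos hx]

-- A with every group rewritten as a filter by the pure predicates
theorem pv_A_pure (pt : String) (l : List String) :
    select_profile_column_py pt l =
      (match pvFirstGroup (
        if pt == "consumption" then
          [l.filter (fun c => pvMC c && pvTh c),
           l.filter pvTh,
           l.filter (fun c => pvMC c && !pvTh c),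
           l.filter (fun c => !pvTh c)]
        else if pt == "production" then
          [l.filter (fun c => pvMP c && !pvTh c),
           l.filter pvMP,
           l.filter (fun c => !pvTh c)]
        else
          [l.filter (fun c => pvMPC c && !pvTh c),
           l.filter (fun c => !pvTh c),
           l.filter pvTh]) with
       | some c => c
       | none => (PySem.List.pyGet? l 0).getD "") := by
  simp only [select_profile_column_py]
  have e1 : l.filter (fun col =>
        PySem.Str.isIn "1000" ((PySem.Dict.ofList (l.map (fun col => (col, PySem.Str.lower col)))).getD col "")
        || PySem.Str.isIn "mwh" ((PySem.Dict.ofList (l.map (fun col => (col, PySem.Str.lower col)))).getD col ""))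
      = l.filter pvTh :=
    List.filter_congr (fun x hx => by rw [pv_getD_lowered l x hx]; rfl)
  rw [e1]
  have e2 : l.filter (fun col => !((l.filter pvTh).contains col)) = l.filter (fun c => !pvTh c) :=
    List.filter_congr (fun x hx => by by_cases hp : pvTh x <;> simp [List.mem_filter, hx, hp])
  rw [e2]
  have e3 : ∀ (p : String → Bool) (kws : List String),
      (l.filter p).filter (fun col =>
        kws.any (fun keyword =>
          PySem.Str.isIn keyword ((PySem.Dict.ofList (l.map (fun col => (col, PySem.Str.lower col)))).getD col "")))
      = l.filter (fun c => kws.any (fun keyword => PySem.Str.isIn keyword (PySem.Str.lower c)) && p c) := by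
    intro p kws
    rw [List.filter_congr (fun x hx => by
      rw [pv_getD_lowered l x (List.mem_filter.mp hx).1])]
    exact List.filter_filter
  have e4 : l.filter (fun col =>
        PRODUCTION_KEYWORDS.any (fun keyword =>
          PySem.Str.isIn keyword ((PySem.Dict.ofList (l.map (fun col => (col, PySem.Str.lower col)))).getD col "")))
      = l.filter pvMP :=
    List.filter_congr (fun x hx => by rw [pv_getD_lowered l x hx]; rfl)
  rw [e3, e3, e3, e3, e4]
  rfl

-- the Python min with key: first element achieving the minimal key
theorem pv_fold_min (k : String → Nat) : ∀ (t : List String) (m₀ : String),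
    ∃ l₁ m l₂, m₀ :: t = l₁ ++ m :: l₂ ∧
      PySem.List.min? (m₀ :: t) k = some m ∧
      (∀ y ∈ l₁, k m < k y) ∧ (∀ y ∈ m₀ :: t, k m ≤ k y) := by
  intro t
  induction t with
  | nil =>
      intro m₀
      exact ⟨[], m₀, [], rfl, by simp [PySem.List.min?], by simp, by
        intro y hy; simp at hy; subst hy; exact le_refl _⟩
  | cons x t ih =>
      intro m₀
      by_cases h : k x < k m₀
      · obtain ⟨l₁, m, l₂, heq, hfold, hfirst, hmin⟩ := ih x
        refine ⟨m₀ :: l₁, m, l₂, by simp [heq], ?_, ?_, ?_⟩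
        · rw [← hfold]; simp [PySem.List.min?, h]
        · intro y hy
          rcases List.mem_cons.mp hy with rfl | hy
          · exact lt_of_le_of_lt (hmin x (List.mem_cons_self)) h
          · exact hfirst y hy
        · intro y hy
          rcases List.mem_cons.mp hy with rfl | hy
          · exact le_of_lt (lt_of_le_of_lt (hmin x (List.mem_cons_self)) h)
          · exact hmin y hy
      · obtain ⟨l₁, m, l₂, heq, hfold, hfirst, hmin⟩ := ih m₀
        have hfold' : PySem.List.min? (m₀ :: x :: t) k = some m := by
          rw [← hfold]; simp [PySem.List.min?, h]
        cases l₁ with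
        | nil =>
            obtain ⟨rfl, rfl⟩ : m₀ = m ∧ t = l₂ := by
              simpa using heq
            refine ⟨[], m₀, x :: t, rfl, hfold', by simp, ?_⟩
            intro y hy
            rcases List.mem_cons.mp hy with rfl | hy
            · exact le_refl _
            · rcases List.mem_cons.mp hy with rfl | hy
              · exact le_of_not_gt h
              · exact hmin y (List.mem_cons_of_mem _ hy)
        | cons a l₁' =>
            rw [List.cons_append] at heq
            obtain ⟨ha, ht⟩ := List.cons_eq_cons.mp heq
            subst ha; subst ht
            have hmm₀ : k m < k m₀ := hfirst m₀ List.mem_cons_self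
            refine ⟨m₀ :: x :: l₁', m, l₂, by simp, hfold', ?_, ?_⟩
            · intro y hy
              rcases List.mem_cons.mp hy with rfl | hy
              · exact hmm₀
              · rcases List.mem_cons.mp hy with rfl | hy
                · exact lt_of_lt_of_le hmm₀ (le_of_not_gt h)
                · exact hfirst y (List.mem_cons_of_mem _ hy)
            · intro y hy
              rcases List.mem_cons.mp hy with rfl | hy
              · exact le_of_lt hmm₀
              · rcases List.mem_cons.mp hy with rfl | hy
                · exact le_of_lt (lt_of_lt_of_le hmm₀ (le_of_not_gt h))
                · exact hmin y (List.mem_cons_of_mem _ hy)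

theorem pv_B_eq (pt : String) (l : List String) :
    select_profile_column_py_alt pt l = (PySem.List.min? l (pvTier pt)).getD "" := rfl

theorem pv_filter_first (q : String → Bool) (l₁ l₂ : List String) (m : String)
    (hm : q m = true) (h₁ : ∀ y ∈ l₁, ¬ q y = true) :
    (l₁ ++ m :: l₂).filter q = m :: l₂.filter q := by
  simp [List.filter_append, List.filter_eq_nil_iff.mpr h₁, List.filter_cons, hm]

theorem pv_A_eq (pt : String) (l l₁ l₂ : List String) (m : String)
    (hl : l = l₁ ++ m :: l₂)
    (hfirst : ∀ y ∈ l₁, pvTier pt m < pvTier pt y)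
    (hmin : ∀ y ∈ l, pvTier pt m ≤ pvTier pt y) :
    select_profile_column_py pt l = m := by
  subst hl
  rw [pv_A_pure]
  cases hc : (pt == "consumption") with
  | true =>
    simp only [hc, if_true]
    by_cases h1 : pvTh m = true <;> by_cases h2 : pvMC m = true
    · -- tier 0: thousand & match
      rw [pv_filter_first (fun c => pvMC c && pvTh c) l₁ l₂ m (by simp [h1, h2])
        (fun y hy hq => by
          obtain ⟨hq1, hq2⟩ := Bool.and_eq_true _ _ ▸ hq
          have := hfirst y hy
          simp [pvTier, hc, h1, h2, hq1, hq2] at this)]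
      rfl
    · -- tier 1: thousand, no match
      rw [(List.filter_eq_nil_iff (l := l₁ ++ m :: l₂) (p := fun c => pvMC c && pvTh c)).mpr
        (fun y hy hq => by
          obtain ⟨hq1, hq2⟩ := Bool.and_eq_true _ _ ▸ hq
          have := hmin y hy
          simp [pvTier, hc, h1, h2, hq1, hq2] at this),
        pv_filter_first pvTh l₁ l₂ m h1
        (fun y hy hq => by
          have := hfirst y hy
          by_cases hmc : pvMC y = true <;> simp [pvTier, hc, h1, h2, hq, hmc] at this)]
      rfl
    · -- tier 2: base & match
      have hthf : ∀ y ∈ l₁ ++ m :: l₂, pvTh y = false := fun y hy => by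
        have := hmin y hy
        by_cases hth : pvTh y = true <;> by_cases hmc : pvMC y = true <;>
          simp [pvTier, hc, h1, h2, hth, hmc] at this ⊢
      rw [List.filter_eq_nil_iff.mpr (fun y hy hq =>
            by simp [hthf y hy] at hq),
          List.filter_eq_nil_iff.mpr (fun y hy hq => by simp [hthf y hy] at hq),
          pv_filter_first (fun c => pvMC c && !pvTh c) l₁ l₂ m (by simp [h1, h2])
        (fun y hy hq => by
          obtain ⟨hq1, hq2⟩ := Bool.and_eq_true _ _ ▸ hq
          have := hfirst y hy
          simp at hq2
          simp [pvTier, hc, h1, h2, hq1, hq2] at this)]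
      rfl
    · -- tier 3: base, no match
      have hm3 : pvTier pt m = 3 := by simp [pvTier, hc, h1, h2]
      have hnil : l₁ = [] := by
        cases hl₁ : l₁ with
        | nil => rfl
        | cons a t' =>
            have := hfirst a (by simp [hl₁])
            have hle := pvTier_le pt a
            omega
      subst hnil
      have hthf : ∀ y ∈ ([] : List String) ++ m :: l₂, pvTh y = false := fun y hy => by
        have := hmin y hy
        by_cases hth : pvTh y = true <;> by_cases hmc : pvMC y = true <;>
          simp [pvTier, hc, h1, h2, hth, hmc] at this ⊢
      rw [List.filter_eq_nil_iff.mpr (fun y hy hq => by simp [hthf y hy] at hq),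
          List.filter_eq_nil_iff.mpr (fun y hy hq => by simp [hthf y hy] at hq),
          (List.filter_eq_nil_iff (l := [] ++ m :: l₂) (p := fun c => pvMC c && !pvTh c)).mpr
            (fun y hy hq => by
              obtain ⟨hq1, hq2⟩ := Bool.and_eq_true _ _ ▸ hq
              have := hmin y hy
              simp at hq2
              simp [pvTier, hc, h1, h2, hq1, hq2] at this),
          pv_filter_first (fun c => !pvTh c) [] l₂ m (by simp [h1]) (by simp)]
      rfl
  | false =>
    cases hp : (pt == "production") with
    | true =>
      simp only [hc, hp, if_true, Bool.false_eq_true, if_false]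
      by_cases h1 : pvMP m = true <;> by_cases h2 : pvTh m = true
      · -- tier 1: match & thousand
        rw [(List.filter_eq_nil_iff (l := l₁ ++ m :: l₂) (p := fun c => pvMP c && !pvTh c)).mpr
            (fun y hy hq => by
              obtain ⟨hq1, hq2⟩ := Bool.and_eq_true _ _ ▸ hq
              have := hmin y hy
              simp at hq2
              simp [pvTier, hc, hp, h1, h2, hq1, hq2] at this),
          pv_filter_first pvMP l₁ l₂ m h1
            (fun y hy hq => by
              have := hfirst y hy
              by_cases hth : pvTh y = true <;> simp [pvTier, hc, hp, h1, h2, hq, hth] at this)]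
        rfl
      · -- tier 0: match & base
        rw [pv_filter_first (fun c => pvMP c && !pvTh c) l₁ l₂ m (by simp [h1, h2])
          (fun y hy hq => by
            obtain ⟨hq1, hq2⟩ := Bool.and_eq_true _ _ ▸ hq
            have := hfirst y hy
            simp at hq2
            simp [pvTier, hc, hp, h1, h2, hq1, hq2] at this)]
        rfl
      · -- tier 3: no match, thousand
        have hm3 : pvTier pt m = 3 := by simp [pvTier, hc, hp, h1, h2]
        have hnil : l₁ = [] := by
          cases hl₁ : l₁ with
          | nil => rfl
          | cons a t' =>
              have := hfirst a (by simp [hl₁])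
              have hle := pvTier_le pt a
              omega
        subst hnil
        have hmpf : ∀ y ∈ ([] : List String) ++ m :: l₂, pvMP y = false := fun y hy => by
          have := hmin y hy
          by_cases hmp : pvMP y = true <;> by_cases hth : pvTh y = true <;>
            simp [pvTier, hc, hp, h1, h2, hmp, hth] at this ⊢
        have hthT : ∀ y ∈ ([] : List String) ++ m :: l₂, pvTh y = true := fun y hy => by
          have := hmin y hy
          by_cases hth : pvTh y = true
          · exact hth
          · simp [pvTier, hc, hp, h1, h2, hmpf y hy, hth] at this
        rw [List.filter_eq_nil_iff.mpr (fun y hy hq => by simp [hmpf y hy] at hq),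
            List.filter_eq_nil_iff.mpr (fun y hy hq => by simp [hmpf y hy] at hq),
            (List.filter_eq_nil_iff (l := [] ++ m :: l₂) (p := fun c => !pvTh c)).mpr
              (fun y hy hq => by simp [hthT y hy] at hq)]
        simp [pvFirstGroup, PySem.List.pyGet?, PySem.List.pyIdx?]
      · -- tier 2: no match, base
        have hmpf : ∀ y ∈ l₁ ++ m :: l₂, pvMP y = false := fun y hy => by
          have := hmin y hy
          by_cases hmp : pvMP y = true <;> by_cases hth : pvTh y = true <;>
            simp [pvTier, hc, hp, h1, h2, hmp, hth] at this ⊢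
        rw [List.filter_eq_nil_iff.mpr (fun y hy hq => by simp [hmpf y hy] at hq),
            List.filter_eq_nil_iff.mpr (fun y hy hq => by simp [hmpf y hy] at hq),
            pv_filter_first (fun c => !pvTh c) l₁ l₂ m (by simp [h2])
              (fun y hy hq => by
                have := hfirst y hy
                simp at hq
                simp [pvTier, hc, hp, h1, h2, hmpf y (by simp [hy]), hq] at this)]
        rfl
    | false =>
      simp only [hc, hp, Bool.false_eq_true, if_false]
      by_cases h1 : pvTh m = true
      · -- tier 2: thousand
        have hthT : ∀ y ∈ l₁ ++ m :: l₂, pvTh y = true := fun y hy => by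
          have := hmin y hy
          by_cases hth : pvTh y = true
          · exact hth
          · by_cases hmpc : pvMPC y = true <;> simp [pvTier, hc, hp, h1, hth, hmpc] at this
        have hnil : l₁ = [] := by
          cases hl₁ : l₁ with
          | nil => rfl
          | cons a t' =>
              have := hfirst a (by simp [hl₁])
              have hle : pvTier pt a ≤ 2 := by
                simp only [pvTier, hc, hp, Bool.false_eq_true, if_false]
                split_ifs <;> omega
              have hm2 : pvTier pt m = 2 := by simp [pvTier, hc, hp, h1]
              omega
        subst hnil
        rw [List.filter_eq_nil_iff.mpr (fun y hy hq => by
              obtain ⟨_, hq2⟩ := Bool.and_eq_true _ _ ▸ hq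
              simp [hthT y hy] at hq2),
            (List.filter_eq_nil_iff (l := [] ++ m :: l₂) (p := fun c => !pvTh c)).mpr
              (fun y hy hq => by simp [hthT y hy] at hq),
            pv_filter_first pvTh [] l₂ m h1 (by simp)]
        rfl
      · by_cases h2 : pvMPC m = true
        · -- tier 0: base & match
          rw [pv_filter_first (fun c => pvMPC c && !pvTh c) l₁ l₂ m (by simp [h1, h2])
            (fun y hy hq => by
              obtain ⟨hq1, hq2⟩ := Bool.and_eq_true _ _ ▸ hq
              have := hfirst y hy
              simp at hq2
              simp [pvTier, hc, hp, h1, h2, hq1, hq2] at this)]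
          rfl
        · -- tier 1: base, no match
          rw [(List.filter_eq_nil_iff (l := l₁ ++ m :: l₂) (p := fun c => pvMPC c && !pvTh c)).mpr
              (fun y hy hq => by
                obtain ⟨hq1, hq2⟩ := Bool.and_eq_true _ _ ▸ hq
                have := hmin y hy
                simp at hq2
                simp [pvTier, hc, hp, h1, h2, hq1, hq2] at this),
            pv_filter_first (fun c => !pvTh c) l₁ l₂ m (by simp [h1])
              (fun y hy hq => by
                have := hfirst y hy
                simp at hq
                by_cases hmpc : pvMPC y = true <;>
                  simp [pvTier, hc, hp, h1, h2, hq, hmpc] at this)]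
          rfl

-- ===== VERDICT (by name: the statement is the Claim_ definition above) =====
theorem select_profile_column_py_spec : Claim_equal_select_profile_column_py := by
  intro pt l _hdom hpre
  unfold Spec_select_profile_column_py
  match l, hpre with
  | x :: t, _ =>
    obtain ⟨l₁, m, l₂, heq, hmin?, hfirst, hmin⟩ := pv_fold_min (pvTier pt) t x
    rw [pv_B_eq, hmin?, Option.getD_some]
    exact pv_A_eq pt (x :: t) l₁ l₂ m heq hfirst hmin
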